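-- pv_equiv track=rewrite | github.com/jcolinpatrick/kryptos | scripts/transposition/other/e_s_12_reading_orders.py | s_curve
-- ===== SOURCE A (Python) =====
-- def s_curve(n, width):
--     """S-curve: zigzag through columns."""
--     order = []
--     n_rows = (n + width - 1) // width
--     for col in range(width):
--         if col % 2 == 0:
--             for row in range(n_rows):
--                 pos = row * width + col
--                 if pos < n:
--                     order.append(pos)
--         else:
--             for row in range(n_rows - 1, -1, -1):
--                 pos = row * width + col
--                 if pos < n:
--                     order.append(pos)
--     return order
-- ===== SOURCE B (Python) =====
-- def s_curve(n, width):
--     """S-curve: sort the indices by (column, row signed by column parity)."""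
--     return sorted(range(n),
--                   key=lambda p: (p % width,
--                                  -(p // width) if (p % width) % 2 else p // width))
-- ===== Notes on version B (the rewrite author's own statement) =====
-- stated objective: alternative
-- what changed: B generates no traversal at all: it sorts the indices 0..n-1 by the key (column, row signed by column parity), replacing A's direction-controlled nested loops, n_rows ceiling and pos<n filtering with one sorted() call.
-- outside the precondition, e.g. on s_curve(3, -2): A returns [], B returns [1, 2, 0]
import Mathlib
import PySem

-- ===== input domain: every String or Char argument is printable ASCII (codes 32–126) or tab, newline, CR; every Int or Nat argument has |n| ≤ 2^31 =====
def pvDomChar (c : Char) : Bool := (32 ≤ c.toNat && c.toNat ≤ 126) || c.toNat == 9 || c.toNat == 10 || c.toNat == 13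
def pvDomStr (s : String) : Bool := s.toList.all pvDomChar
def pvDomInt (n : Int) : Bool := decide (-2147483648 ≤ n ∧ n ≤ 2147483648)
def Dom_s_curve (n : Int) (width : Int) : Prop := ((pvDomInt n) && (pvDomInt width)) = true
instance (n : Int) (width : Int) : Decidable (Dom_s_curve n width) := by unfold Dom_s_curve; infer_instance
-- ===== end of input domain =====

-- B replaces A's direction-controlled nested column/row loops by a single sort of the
-- indices 0..n-1 under the key (column, row signed by column parity); objective: alternative.

-- ===== PORT A =====
def s_curve (n : Int) (width : Int) : List Int :=
  let n_rows := PySem.Int.floordiv (n + width - 1) width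
  (PySem.List.pyRange 0 width 1).foldl (fun order col =>
    if PySem.Int.mod col 2 = 0 then
      (PySem.List.pyRange 0 n_rows 1).foldl (fun order row =>
        let pos := row * width + col
        if pos < n then order ++ [pos] else order) order
    else
      (PySem.List.pyRange (n_rows - 1) (-1) (-1)).foldl (fun order row =>
        let pos := row * width + col
        if pos < n then order ++ [pos] else order) order) []

-- ===== PORT B =====
def s_curve_alt (n : Int) (width : Int) : List Int :=
  PySem.List.sorted2 (PySem.List.pyRange 0 n 1)
    (fun p => PySem.Int.mod p width)
    (fun p => if PySem.Int.mod (PySem.Int.mod p width) 2 ≠ 0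
              then -(PySem.Int.floordiv p width) else PySem.Int.floordiv p width)

-- ===== PRECONDITION & SPEC =====
-- Pre_ excludes width = 0 (A raises ZeroDivisionError computing n_rows) and the
-- malformed inputs width < 0 with n > 0, outside the task's natural domain, where A's
-- empty result is an accident of range(width) being empty while B still sorts the n indices.
def Pre_s_curve (n : Int) (width : Int) : Prop := 0 < width ∨ (width < 0 ∧ n ≤ 0)
instance (n : Int) (width : Int) : Decidable (Pre_s_curve n width) := by unfold Pre_s_curve; infer_instance
def pvWitness_s_curve : Int × Int := (7, 3)
def Spec_s_curve (n : Int) (width : Int) (out : List Int) : Prop := out = s_curve_alt n width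
instance (n : Int) (width : Int) (out : List Int) : Decidable (Spec_s_curve n width out) := by unfold Spec_s_curve; infer_instance

-- ===== CLAIM (what is proved, stated in full; the proofs are below) =====
def Claim_equal_s_curve : Prop := ∀ (n : Int) (width : Int), Dom_s_curve n width → Pre_s_curve n width → Spec_s_curve n width (s_curve n width)

-- ===== LEMMAS AND PROOFS =====

-- sorted2 with two Int keys is sorted under the lexicographic key
lemma pv_sorted2_eq_sorted {α : Type} (xs : List α) (k1 k2 : α → Int) :
    PySem.List.sorted2 xs k1 k2 = PySem.List.sorted xs (fun x => toLex (k1 x, k2 x)) := by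
  rw [PySem.List.sorted_eq_foldl_insertBy]
  show xs.foldl (fun acc x => PySem.List.insertBy
      (fun a b => decide (k1 a < k1 b) || (!decide (k1 b < k1 a) && decide (k2 a < k2 b))) x acc) []
    = _
  have h : (fun (a b : α) => decide (k1 a < k1 b) || (!decide (k1 b < k1 a) && decide (k2 a < k2 b)))
      = (fun a b => decide ((fun x => toLex (k1 x, k2 x)) a < (fun x => toLex (k1 x, k2 x)) b)) := by
    funext a b
    by_cases h1 : k1 a < k1 b <;> by_cases h2 : k1 b < k1 a <;> by_cases h3 : k2 a < k2 b <;>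
      simp [Prod.Lex.lt_iff, h1, h2, h3] <;> omega
  rw [h]

-- the filtered, mapped row range of column `col` IS range(col, n, width)  (from A's loops)
lemma pv_filter_range_eq_range (p : Nat → Bool) (L R : Nat) (hLR : L ≤ R)
    (h : ∀ k, k < R → (p k = true ↔ k < L)) :
    (List.range R).filter p = List.range L := by
  induction R with
  | zero =>
    have hL0 : L = 0 := by omega
    simp [hL0]
  | succ R ih =>
    rcases Nat.lt_or_ge L (R + 1) with hL | hL
    · have hpR : p R = false := by
        have hiff := h R (by omega)
        cases hcp : p R with
        | false => rfl
        | true => exact absurd (hiff.1 hcp) (by omega)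
      rw [List.range_succ, List.filter_append]
      simp only [List.filter_cons, hpR, List.filter_nil, Bool.false_eq_true, if_false]
      rw [ih (by omega) (fun k hk => h k (by omega))]
      simp
    · have hLeq : L = R + 1 := by omega
      subst hLeq
      rw [List.filter_eq_self.2]
      intro a ha
      exact (h a (List.mem_range.1 ha)).2 (List.mem_range.1 ha)

lemma pv_col_core (n width col : Int) (hw : 0 < width) (hc0 : 0 ≤ col) :
    ((PySem.List.pyRange 0 (PySem.Int.floordiv (n + width - 1) width) 1).filter
        (fun row => decide (row * width + col < n))).map (fun row => row * width + col)
      = PySem.List.pyRange col n width := by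
  have hR := (PySem.Int.floordiv_eq_iff_of_pos (a := n + width - 1) hw).1 rfl
  rw [PySem.List.pyRange_one, PySem.List.pyRange_of_pos col n hw, List.filter_map, List.map_map]
  by_cases hcn : col < n
  · have hfd : PySem.Int.floordiv (n - col + width - 1) width = (n - col + width - 1) / width :=
      PySem.Int.floordiv_eq_ediv_of_pos hw
    have hL := (PySem.Int.floordiv_eq_iff_of_pos (a := n - col + width - 1) hw).1 hfd
    set Li : Int := (n - col + width - 1) / width with hLi
    have hL0 : 0 < Li := by nlinarith [hL.1, hL.2]
    have hLRi : Li ≤ PySem.Int.floordiv (n + width - 1) width := by nlinarith [hL.1, hL.2, hR.1, hR.2]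
    rw [if_pos hcn]
    rw [pv_filter_range_eq_range _ Li.toNat ((PySem.Int.floordiv (n + width - 1) width - 0).toNat)
      (by omega)
      (by
        intro k hk
        simp only [Function.comp, decide_eq_true_eq, zero_add]
        constructor
        · intro hlt
          have : (k : Int) < Li := by nlinarith [hL.2]
          omega
        · intro hlt
          have hk1 : (k : Int) + 1 ≤ Li := by omega
          nlinarith [hL.1, mul_le_mul_of_nonneg_right hk1 (le_of_lt hw)])]
    refine List.map_congr_left ?_
    intro k hk
    simp only [Function.comp]
    ring
  · rw [if_neg hcn]
    have hall : ∀ k, k < ((PySem.Int.floordiv (n + width - 1) width - 0).toNat) →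
        (((fun row => decide (row * width + col < n)) ∘ fun k : Nat => 0 + (k : Int)) k = true ↔ k < 0) := by
      intro k hk
      simp only [Function.comp, decide_eq_true_eq, zero_add]
      constructor
      · intro hlt
        have hkw : 0 ≤ (k : Int) * width := mul_nonneg (by positivity) (le_of_lt hw)
        omega
      · omega
    rw [pv_filter_range_eq_range _ 0 _ (by omega) hall]
    simp

lemma pv_even_loop (n width col : Int) (acc : List Int) (hw : 0 < width) (hc0 : 0 ≤ col) :
    (PySem.List.pyRange 0 (PySem.Int.floordiv (n + width - 1) width) 1).foldl
        (fun order row => if row * width + col < n then order ++ [row * width + col] else order) acc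
      = acc ++ PySem.List.pyRange col n width := by
  rw [PySem.List.foldl_append_ite (fun row => row * width + col < n) (fun row => row * width + col)]
  rw [pv_col_core n width col hw hc0]

lemma pv_odd_loop (n width col : Int) (acc : List Int) (hw : 0 < width) (hc0 : 0 ≤ col) :
    (PySem.List.pyRange (PySem.Int.floordiv (n + width - 1) width - 1) (-1) (-1)).foldl
        (fun order row => if row * width + col < n then order ++ [row * width + col] else order) acc
      = acc ++ (PySem.List.pyRange col n width).reverse := by
  have hrev : PySem.List.pyRange (PySem.Int.floordiv (n + width - 1) width - 1) (-1) (-1)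
      = (PySem.List.pyRange 0 (PySem.Int.floordiv (n + width - 1) width) 1).reverse := by
    rw [PySem.List.pyRange_neg_one_eq_reverse]
    norm_num
  rw [hrev,
    PySem.List.foldl_append_ite (fun row => row * width + col < n) (fun row => row * width + col),
    List.filter_reverse, List.map_reverse, pv_col_core n width col hw hc0]

-- A's column blocks
def pvBlk (n width col : Int) : List Int :=
  if PySem.Int.mod col 2 = 0 then PySem.List.pyRange col n width
  else (PySem.List.pyRange col n width).reverse

-- A is the concatenation of its column blocks
lemma pv_A_flatMap (n width : Int) (hw : 0 < width) :
    s_curve n width = (PySem.List.pyRange 0 width 1).flatMap (pvBlk n width) := by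
  unfold s_curve
  rw [show ((PySem.List.pyRange 0 width 1).foldl (fun order col =>
      if PySem.Int.mod col 2 = 0 then
        (PySem.List.pyRange 0 (PySem.Int.floordiv (n + width - 1) width) 1).foldl (fun order row =>
          if row * width + col < n then order ++ [row * width + col] else order) order
      else
        (PySem.List.pyRange (PySem.Int.floordiv (n + width - 1) width - 1) (-1) (-1)).foldl
          (fun order row =>
          if row * width + col < n then order ++ [row * width + col] else order) order) [])
    = (PySem.List.pyRange 0 width 1).foldl (fun order col => order ++ pvBlk n width col) []
    from ?_]
  · exact PySem.List.foldl_append_eq_flatMap _ _ []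
  · refine PySem.List.foldl_congr_mem _ _ _ _ ?_
    intro acc col hcol
    obtain ⟨hc0, -⟩ := (PySem.List.mem_pyRange_one).1 hcol
    unfold pvBlk
    by_cases hpar : PySem.Int.mod col 2 = 0
    · rw [if_pos hpar, if_pos hpar]
      exact pv_even_loop n width col acc hw hc0
    · rw [if_neg hpar, if_neg hpar]
      exact pv_odd_loop n width col acc hw hc0

-- membership in a column block
lemma pv_mem_blk (n width col x : Int) (hw : 0 < width) (hc0 : 0 ≤ col) (hcw : col < width) :
    x ∈ pvBlk n width col ↔ 0 ≤ x ∧ x < n ∧ x % width = col := by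
  have hmem : x ∈ PySem.List.pyRange col n width ↔ col ≤ x ∧ x < n ∧ width ∣ x - col :=
    PySem.List.mem_pyRange_iff_of_pos hw x
  have hiff : (col ≤ x ∧ x < n ∧ width ∣ x - col) ↔ (0 ≤ x ∧ x < n ∧ x % width = col) := by
    constructor
    · rintro ⟨hcx, hxn, t, ht⟩
      have hx : x = col + width * t := by omega
      refine ⟨by omega, hxn, ?_⟩
      rw [hx, Int.add_mul_emod_self_left, Int.emod_eq_of_lt hc0 hcw]
    · rintro ⟨hx0, hxn, hm⟩
      have hdvd : width ∣ x - col := by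
        refine ⟨x / width, ?_⟩
        have := Int.mul_ediv_add_emod x width
        omega
      have hq0 : 0 ≤ x / width := Int.ediv_nonneg hx0 (le_of_lt hw)
      have : 0 ≤ width * (x / width) := mul_nonneg (le_of_lt hw) hq0
      have := Int.mul_ediv_add_emod x width
      exact ⟨by omega, hxn, hdvd⟩
  unfold pvBlk
  by_cases hpar : PySem.Int.mod col 2 = 0
  · rw [if_pos hpar]
    exact hmem.trans hiff
  · rw [if_neg hpar, List.mem_reverse]
    exact hmem.trans hiff

-- B's sort key in lexicographic form
def pvKey (width : Int) (p : Int) : Lex (Int × Int) :=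
  toLex (PySem.Int.mod p width,
    if PySem.Int.mod (PySem.Int.mod p width) 2 ≠ 0
    then -(PySem.Int.floordiv p width) else PySem.Int.floordiv p width)

lemma pv_key_at (width col : Int) (k : Nat) (hw : 0 < width) (hc0 : 0 ≤ col) (hcw : col < width) :
    pvKey width (col + width * (k : Int))
      = toLex (col, if PySem.Int.mod col 2 ≠ 0 then -(k : Int) else (k : Int)) := by
  have hmod : PySem.Int.mod (col + width * (k : Int)) width = col := by
    rw [PySem.Int.mod_eq_emod_of_pos hw, Int.add_mul_emod_self_left, Int.emod_eq_of_lt hc0 hcw]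
  have hdiv : PySem.Int.floordiv (col + width * (k : Int)) width = (k : Int) := by
    rw [PySem.Int.floordiv_eq_ediv_of_pos hw, Int.add_mul_ediv_left _ _ (by omega),
      Int.ediv_eq_zero_of_lt hc0 hcw, zero_add]
  unfold pvKey
  rw [hmod, hdiv]

-- each block is strictly increasing under the key
lemma pv_blk_pairwise (n width col : Int) (hw : 0 < width) (hc0 : 0 ≤ col) (hcw : col < width) :
    (pvBlk n width col).Pairwise (fun a b => pvKey width a < pvKey width b) := by
  unfold pvBlk
  rw [PySem.List.pyRange_of_pos col n hw]
  by_cases hpar : PySem.Int.mod col 2 = 0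
  · rw [if_pos hpar, List.pairwise_map]
    refine List.pairwise_lt_range.imp ?_
    intro k1 k2 hk
    rw [pv_key_at width col k1 hw hc0 hcw, pv_key_at width col k2 hw hc0 hcw]
    simp only [hpar, ne_eq, not_true_eq_false, if_false]
    rw [Prod.Lex.lt_iff]
    simp only [ofLex_toLex]
    right
    exact ⟨by simp, by exact_mod_cast hk⟩
  · rw [if_neg hpar, List.pairwise_reverse, List.pairwise_map]
    refine List.pairwise_lt_range.imp ?_
    intro k1 k2 hk
    rw [pv_key_at width col k1 hw hc0 hcw, pv_key_at width col k2 hw hc0 hcw]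
    simp only [hpar, ne_eq, not_false_eq_true, if_true]
    rw [Prod.Lex.lt_iff]
    simp only [ofLex_toLex]
    right
    exact ⟨by simp, by omega⟩

-- the whole concatenation is strictly increasing under the key
lemma pv_flat_pairwise (n width : Int) (hw : 0 < width) :
    ((PySem.List.pyRange 0 width 1).flatMap (pvBlk n width)).Pairwise
      (fun a b => pvKey width a < pvKey width b) := by
  rw [List.pairwise_flatMap]
  constructor
  · intro col hcol
    obtain ⟨hc0, hcw⟩ := (PySem.List.mem_pyRange_one).1 hcol
    exact pv_blk_pairwise n width col hw hc0 hcw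
  · refine List.Pairwise.imp_of_mem ?_ (PySem.List.pairwise_lt_pyRange_one (a := 0) (b := width))
    intro c1 c2 h1 h2 hlt x hx y hy
    obtain ⟨hc10, hc1w⟩ := (PySem.List.mem_pyRange_one).1 h1
    obtain ⟨hc20, hc2w⟩ := (PySem.List.mem_pyRange_one).1 h2
    obtain ⟨hx0, -, hxm⟩ := (pv_mem_blk n width c1 x hw hc10 hc1w).1 hx
    obtain ⟨hy0, -, hym⟩ := (pv_mem_blk n width c2 y hw hc20 hc2w).1 hy
    unfold pvKey
    rw [Prod.Lex.lt_iff]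
    simp only [ofLex_toLex]
    left
    rw [PySem.Int.mod_eq_emod_of_pos hw, PySem.Int.mod_eq_emod_of_pos hw, hxm, hym]
    exact hlt

-- ===== VERDICT (by name: the statement is the Claim_ definition above) =====
theorem s_curve_spec : Claim_equal_s_curve := by
  intro n width _ hpre
  unfold Spec_s_curve
  rcases hpre with hw | ⟨hw, hn⟩
  · rw [pv_A_flatMap n width hw]
    unfold s_curve_alt
    rw [pv_sorted2_eq_sorted]
    have hpw := pv_flat_pairwise n width hw
    have hnd : ((PySem.List.pyRange 0 width 1).flatMap (pvBlk n width)).Nodup :=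
      hpw.imp (fun h => fun he => (ne_of_lt h) (by rw [he]))
    have hm : ∀ a, a ∈ (PySem.List.pyRange 0 width 1).flatMap (pvBlk n width)
        ↔ a ∈ PySem.List.pyRange 0 n 1 := by
      intro a
      rw [List.mem_flatMap, PySem.List.mem_pyRange_one]
      constructor
      · rintro ⟨col, hcol, hblk⟩
        obtain ⟨hc0, hcw⟩ := (PySem.List.mem_pyRange_one).1 hcol
        obtain ⟨h1, h2, -⟩ := (pv_mem_blk n width col a hw hc0 hcw).1 hblk
        exact ⟨h1, h2⟩
      · rintro ⟨h0, hn2⟩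
        refine ⟨a % width, ?_, ?_⟩
        · exact (PySem.List.mem_pyRange_one).2
            ⟨Int.emod_nonneg a (by omega), Int.emod_lt_of_pos a hw⟩
        · exact (pv_mem_blk n width (a % width) a hw (Int.emod_nonneg a (by omega))
            (Int.emod_lt_of_pos a hw)).2 ⟨h0, hn2, rfl⟩
    have hperm := (List.perm_ext_iff_of_nodup hnd (PySem.List.nodup_pyRange_one 0 n)).2 hm
    exact (PySem.List.sorted_eq_of_perm_of_pairwise_lt _ _ (pvKey width) hperm hpw).symm
  · unfold s_curve s_curve_alt
    rw [PySem.List.pyRange_one_eq_nil (le_of_lt hw), PySem.List.pyRange_one_eq_nil hn]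
    rfl
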